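-- pv_equiv track=rewrite | github.com/harryheone1/python | python_basic/algorithm_exercise/amazon/warehouse_connection.py | number_of_connections
-- ===== SOURCE A (Python) =====
-- def number_of_warehouse(level):
--     count = 0
--     for cel in level:
--         if cel == 1:
--             count += 1
--     return count
--
-- def number_of_connections(graph):
--     pre_lvl = 0
--     res = 0
--
--     for level in graph:
--         # if pre_lvl == -1:
--         #     pre_lvl = number_of_warehouse(level)
--         # else:
--         warehouse_count = number_of_warehouse(level)
--         if warehouse_count > 0:
--             res += pre_lvl * warehouse_count
--             pre_lvl = warehouse_count
--
--     return res
-- ===== SOURCE B (Python) =====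
-- def number_of_connections(graph):
--     counts = [level.count(1) for level in graph]
--     total = 0
--     for i, c in enumerate(counts):
--         if c > 0:
--             for d in counts[i + 1:]:
--                 if d > 0:
--                     total += c * d
--                     break
--     return total
-- ===== Notes on version B (the rewrite author's own statement) =====
-- stated objective: alternative
-- what changed: Instead of a single streaming pass carrying the previous nonempty level's count, B precomputes all per-level counts with list.count(1), then for each nonempty level scans forward through the remaining counts to locate its next nonempty successor and adds the product; a successor-search formulation (worst-case quadratic in levels) rather than an accumulator scan.
import Mathlib
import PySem

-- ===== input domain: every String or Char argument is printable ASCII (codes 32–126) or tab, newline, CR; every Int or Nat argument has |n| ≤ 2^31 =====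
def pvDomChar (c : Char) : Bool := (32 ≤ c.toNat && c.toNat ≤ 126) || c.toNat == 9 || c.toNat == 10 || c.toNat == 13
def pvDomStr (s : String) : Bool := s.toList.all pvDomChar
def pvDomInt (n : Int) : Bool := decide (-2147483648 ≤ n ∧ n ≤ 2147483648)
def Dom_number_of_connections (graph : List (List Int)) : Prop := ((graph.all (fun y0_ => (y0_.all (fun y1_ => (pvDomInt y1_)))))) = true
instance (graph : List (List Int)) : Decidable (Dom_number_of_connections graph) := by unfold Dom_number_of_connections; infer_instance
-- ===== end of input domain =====

-- B replaces A's single accumulator pass by precomputed per-level counts plus, for each nonempty level, a forward successor scan (alternative algorithm, not faster).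


-- ===== PORT A =====
-- number_of_warehouse: explicit counting loop
def number_of_warehouse (level : List Int) : Int :=
  level.foldl (fun count cel => if cel == 1 then count + 1 else count) 0

def number_of_connections (graph : List (List Int)) : Int :=
  (graph.foldl (fun (st : Int × Int) level =>
      let warehouse_count := number_of_warehouse level
      if warehouse_count > 0 then (warehouse_count, st.2 + st.1 * warehouse_count) else st)
    (0, 0)).2

-- ===== PORT B =====
-- inner 'for d in rest: if d > 0: total += c*d; break' loop
def pvInner (c : Int) (rest : List Int) (total : Int) : Int :=
  match rest with
  | [] => total
  | d :: t => if d > 0 then total + c * d else pvInner c t total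

def number_of_connections_alt (graph : List (List Int)) : Int :=
  let counts := graph.map (fun level => (PySem.List.count level 1 : Int))
  (PySem.List.enumerate counts).foldl (fun total (p : Int × Int) =>
    if p.2 > 0 then pvInner p.2 (PySem.List.slice counts (some (p.1 + 1)) none) total
    else total) 0

-- ===== PRECONDITION & SPEC =====
def Spec_number_of_connections (graph : List (List Int)) (out : Int) : Prop := out = number_of_connections_alt graph
instance (graph : List (List Int)) (out : Int) : Decidable (Spec_number_of_connections graph out) := by unfold Spec_number_of_connections; infer_instance

-- ===== CLAIM (what is proved, stated in full; the proofs are below) =====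
def Claim_equal_number_of_connections : Prop := ∀ (graph : List (List Int)), Dom_number_of_connections graph → Spec_number_of_connections graph (number_of_connections graph)

-- ===== LEMMAS AND PROOFS =====

-- chained pairwise product sum: pvP pre [c1, c2, ...] = pre*c1 + c1*c2 + ...
def pvP : Int → List Int → Int
  | _, [] => 0
  | pre, c :: cs => pre * c + pvP c cs

-- successor-sum: each positive entry times the first positive entry after it
def pvG : List Int → Int
  | [] => 0
  | x :: t => (if x > 0 then x * ((t.find? (fun d => d > 0)).getD 0) else 0) + pvG t

theorem number_of_warehouse_eq (level : List Int) :
    number_of_warehouse level = ((PySem.List.count level 1 : Nat) : Int) := by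
  unfold number_of_warehouse
  rw [PySem.List.count_eq]
  suffices h : ∀ (l : List Int) (n : Int),
      l.foldl (fun count cel => if cel == 1 then count + 1 else count) n
        = n + ((l.count 1 : Nat) : Int) by
    simpa using h level 0
  intro l
  induction l with
  | nil => intro n; simp
  | cons x t ih =>
    intro n
    rw [List.foldl_cons]
    by_cases hx : x = 1
    · rw [if_pos (by simp [hx]), ih, List.count_cons, if_pos (by simp [hx])]
      push_cast; ring
    · rw [if_neg (by simp [hx]), ih, List.count_cons, if_neg (by simp [hx])]
      simp

theorem foldA_eq (graph : List (List Int)) : ∀ (pre res : Int),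
    (graph.foldl (fun (st : Int × Int) level =>
        let warehouse_count := number_of_warehouse level
        if warehouse_count > 0 then (warehouse_count, st.2 + st.1 * warehouse_count) else st)
      (pre, res)).2
    = res + pvP pre ((graph.map (fun level => ((PySem.List.count level 1 : Nat) : Int))).filter (fun c => c > 0)) := by
  induction graph with
  | nil => intro pre res; simp [pvP]
  | cons l t ih =>
    intro pre res
    rw [List.foldl_cons]
    simp only [number_of_warehouse_eq] at ih ⊢
    by_cases hc : ((PySem.List.count l 1 : Nat) : Int) > 0
    · rw [if_pos hc, ih, List.map_cons, List.filter_cons, if_pos (by simpa using hc), pvP]; ring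
    · rw [if_neg hc, ih, List.map_cons, List.filter_cons, if_neg (by simpa using hc)]

theorem pvInner_eq' (c : Int) (rest : List Int) : ∀ (total : Int),
    pvInner c rest total = total + c * ((rest.find? (fun d => d > 0)).getD 0) := by
  induction rest with
  | nil => intro total; simp [pvInner]
  | cons d t ih =>
    intro total
    unfold pvInner
    by_cases hd : d > 0
    · rw [if_pos hd]
      rw [List.find?_cons_of_pos (by simpa using hd)]
      simp
    · rw [if_neg hd]
      rw [List.find?_cons_of_neg (by simpa using hd), ih]

theorem foldB_eq (full : List Int) (s : List Int) : ∀ (k : Nat) (acc : Int),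
    full.drop k = s →
    ((PySem.List.enumerate s (k : Int)).foldl (fun total (p : Int × Int) =>
        if p.2 > 0 then pvInner p.2 (PySem.List.slice full (some (p.1 + 1)) none) total
        else total) acc)
    = acc + pvG s := by
  induction s with
  | nil => intro k acc _; simp [PySem.List.enumerate_nil, pvG]
  | cons x t ih =>
    intro k acc hk
    rw [PySem.List.enumerate_cons, List.foldl_cons]
    have ht : full.drop (k + 1) = t := by
      have h := congrArg (fun l => List.drop 1 l) hk
      simpa [List.drop_drop, Nat.add_comm] using h
    have hcast : ((k : Int) + 1) = ((k + 1 : Nat) : Int) := by push_cast; ring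
    have hslice : PySem.List.slice full (some ((k + 1 : Nat) : Int)) none = t := by
      rw [PySem.List.slice_from_natCast, ht]
    by_cases hx : x > 0
    · rw [if_pos hx, hcast, hslice, pvInner_eq']
      rw [ih (k + 1) _ ht]
      simp only [pvG, if_pos hx]
      ring
    · rw [if_neg hx, hcast, ih (k + 1) _ ht]
      simp only [pvG, if_neg hx]
      ring

theorem pvP_split (fs : List Int) (pre : Int) :
    pvP pre fs = pre * fs.headD 0 + pvP 0 fs := by
  cases fs with
  | nil => simp [pvP]
  | cons y fs' => simp only [pvP, List.headD_cons]; ring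

theorem find?_eq_head_filter (s : List Int) :
    ((s.find? (fun d => d > 0)).getD 0) = (s.filter (fun c => c > 0)).headD 0 := by
  induction s with
  | nil => simp
  | cons x t ih =>
    by_cases hx : x > 0
    · rw [List.find?_cons_of_pos (by simpa using hx), List.filter_cons, if_pos (by simpa using hx)]
      simp
    · rw [List.find?_cons_of_neg (by simpa using hx), List.filter_cons, if_neg (by simpa using hx), ih]

theorem pvG_eq_pvP (s : List Int) : pvG s = pvP 0 (s.filter (fun c => c > 0)) := by
  induction s with
  | nil => simp [pvG, pvP]
  | cons x t ih =>
    simp only [pvG, List.filter_cons]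
    by_cases hx : x > 0
    · rw [if_pos hx, if_pos (by simpa using hx), ih, find?_eq_head_filter]
      rw [show pvP 0 (x :: t.filter (fun c => c > 0))
            = 0 * x + pvP x (t.filter (fun c => c > 0)) from rfl]
      rw [pvP_split (t.filter (fun c => c > 0)) x]
      ring
    · rw [if_neg hx, if_neg (by simpa using hx), ih]
      ring

-- ===== VERDICT (by name: the statement is the Claim_ definition above) =====
theorem number_of_connections_spec : Claim_equal_number_of_connections := by
  intro graph _
  unfold Spec_number_of_connections number_of_connections
  rw [foldA_eq]
  have hB : number_of_connections_alt graph
      = ((PySem.List.enumerate (graph.map (fun level => ((PySem.List.count level 1 : Nat) : Int))) 0).foldl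
          (fun total (p : Int × Int) =>
            if p.2 > 0 then
              pvInner p.2 (PySem.List.slice
                (graph.map (fun level => ((PySem.List.count level 1 : Nat) : Int))) (some (p.1 + 1)) none) total
            else total) 0) := rfl
  have h2 := foldB_eq (graph.map (fun level => ((PySem.List.count level 1 : Nat) : Int)))
      (graph.map (fun level => ((PySem.List.count level 1 : Nat) : Int))) 0 0 (by simp)
  simp only [Nat.cast_zero] at h2
  rw [hB, h2, pvG_eq_pvP]
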